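-- pv_equiv track=rewrite | github.com/MagnusAagaard/ludo_game_AI | genetic_algorithm.py | get_danger_pieces
-- ===== SOURCE A (Python) =====
-- def get_danger_pieces(player_pieces, enemy_pieces, safe_spots):
-- 	danger_pieces = 0
-- 	danger_spots = []
-- 	invalid_enemy = [0, 53, 54, 55, 56, 57, 58, 59]
-- 	# correct enemy positions to be as seen from player 1...
-- 	i = 0
-- 	enemy_pieces_corrected = []
-- 	for enemies in enemy_pieces:
-- 		i += 1
-- 		tmp = []
-- 		for enemy in enemies:
-- 			if enemy not in invalid_enemy:
-- 				val = (enemy + i*13) % 52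
-- 				if val == 0:
-- 					val = 52
-- 				tmp.append(val)
-- 			else:
-- 				tmp.append(enemy)
-- 		enemy_pieces_corrected.append(tmp)
--
-- 	for piece in player_pieces:
-- 		for enemies in enemy_pieces_corrected:
-- 			for enemy in enemies:
-- 				if piece - enemy <= 6 and piece - enemy > 0 or piece - enemy >= -50 and piece - enemy <= -46:
-- 					if piece not in safe_spots and enemy not in invalid_enemy and piece not in danger_spots:
-- 						danger_spots.append(piece)
-- 	return len(danger_spots)
-- ===== SOURCE B (Python) =====
-- def get_danger_pieces(player_pieces, enemy_pieces, safe_spots):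
--     invalid_enemy = (0, 53, 54, 55, 56, 57, 58, 59)
--     enemies_set = set()
--     i = 0
--     for enemies in enemy_pieces:
--         i += 1
--         for enemy in enemies:
--             if enemy not in invalid_enemy:
--                 val = (enemy + i * 13) % 52
--                 enemies_set.add(val if val != 0 else 52)
--     danger = 0
--     for piece in set(player_pieces):
--         if piece in safe_spots:
--             continue
--         if any(piece - d in enemies_set for d in range(1, 7)) or \
--            any(piece + d in enemies_set for d in range(46, 51)):
--             danger += 1
--     return danger
-- ===== Notes on version B (the rewrite author's own statement) =====
-- stated objective: faster
-- what changed: Builds a set of valid corrected enemy positions once, then probes the 11 threatening offsets of each distinct non-safe player piece against that set, replacing A's triple nested per-piece enemy scan and its growing danger_spots membership list.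
import Mathlib
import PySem

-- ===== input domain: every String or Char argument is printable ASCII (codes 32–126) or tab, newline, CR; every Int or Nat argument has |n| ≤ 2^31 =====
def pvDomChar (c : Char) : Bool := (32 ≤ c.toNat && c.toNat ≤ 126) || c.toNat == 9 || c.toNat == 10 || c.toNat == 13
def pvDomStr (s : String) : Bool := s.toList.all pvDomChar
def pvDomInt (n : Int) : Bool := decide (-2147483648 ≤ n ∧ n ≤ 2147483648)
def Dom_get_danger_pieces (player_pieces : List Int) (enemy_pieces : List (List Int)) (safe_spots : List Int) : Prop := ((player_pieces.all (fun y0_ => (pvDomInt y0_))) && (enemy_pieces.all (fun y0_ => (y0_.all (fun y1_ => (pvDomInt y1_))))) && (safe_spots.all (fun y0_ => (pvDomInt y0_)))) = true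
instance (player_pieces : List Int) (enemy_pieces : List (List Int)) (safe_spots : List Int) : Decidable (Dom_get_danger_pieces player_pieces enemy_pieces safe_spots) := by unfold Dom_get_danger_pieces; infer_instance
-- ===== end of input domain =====

-- B builds the set of valid corrected enemy positions once and probes each distinct
-- non-safe player piece's 11 threatening offsets against it, instead of A's triple
-- nested scan with a growing danger_spots membership list (measured faster in a timing run).
-- ===== PORT A =====
def pvInvalidA : List Int := [0, 53, 54, 55, 56, 57, 58, 59]

-- Python's 'piece - enemy <= 6 and piece - enemy > 0 or piece - enemy >= -50 and piece - enemy <= -46'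
abbrev pvRel (p e : Int) : Prop := (p - e ≤ 6 ∧ p - e > 0) ∨ (p - e ≥ -50 ∧ p - e ≤ -46)

-- body of 'for enemy in enemies' in A's correction loop
def pvRowBodyA (i : Int) (tmp : List Int) (enemy : Int) : List Int :=
  if enemy ∉ pvInvalidA then
    let val := PySem.Int.mod (enemy + i * 13) 52
    let val := if val = 0 then (52 : Int) else val
    tmp ++ [val]
  else tmp ++ [enemy]

-- body of 'for enemies in enemy_pieces' in A's correction loop (state: i, enemy_pieces_corrected)
def pvCorrBodyA (st : Int × List (List Int)) (enemies : List Int) : Int × List (List Int) :=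
  let i := st.1 + 1
  (i, st.2 ++ [enemies.foldl (pvRowBodyA i) []])

-- body of the innermost 'for enemy in enemies' danger loop
def pvDangerBodyA (safe_spots : List Int) (piece : Int) (ds : List Int) (enemy : Int) : List Int :=
  if pvRel piece enemy then
    if piece ∉ safe_spots ∧ enemy ∉ pvInvalidA ∧ piece ∉ ds then ds ++ [piece] else ds
  else ds

def get_danger_pieces (player_pieces : List Int) (enemy_pieces : List (List Int)) (safe_spots : List Int) : Int :=
  let enemy_pieces_corrected := (enemy_pieces.foldl pvCorrBodyA (0, [])).2
  let danger_spots := player_pieces.foldl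
    (fun ds piece => enemy_pieces_corrected.foldl
      (fun ds enemies => enemies.foldl (pvDangerBodyA safe_spots piece) ds) ds) []
  (danger_spots.length : Int)

-- ===== PORT B =====
-- body of 'for enemy in enemies' in B's set-building loop
def pvRowBodyB (i : Int) (s : PySem.Set Int) (enemy : Int) : PySem.Set Int :=
  if enemy ∉ ([0, 53, 54, 55, 56, 57, 58, 59] : List Int) then
    let val := PySem.Int.mod (enemy + i * 13) 52
    PySem.Set.add s (if val ≠ 0 then val else 52)
  else s

-- body of 'for enemies in enemy_pieces' in B's set-building loop (state: i, enemies_set)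
def pvBuildBodyB (st : Int × PySem.Set Int) (enemies : List Int) : Int × PySem.Set Int :=
  let i := st.1 + 1
  (i, enemies.foldl (pvRowBodyB i) st.2)

-- body of 'for piece in set(player_pieces)'
def pvCountBodyB (safe_spots : List Int) (es : PySem.Set Int) (danger : Int) (piece : Int) : Int :=
  if piece ∈ safe_spots then danger
  else if ((PySem.List.pyRange 1 7 1).any fun d => PySem.Set.contains es (piece - d)) ||
          ((PySem.List.pyRange 46 51 1).any fun d => PySem.Set.contains es (piece + d)) then
    danger + 1
  else danger

def get_danger_pieces_alt (player_pieces : List Int) (enemy_pieces : List (List Int)) (safe_spots : List Int) : Int :=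
  let enemies_set := (enemy_pieces.foldl pvBuildBodyB (0, PySem.Set.empty)).2
  (PySem.Set.ofList player_pieces).foldl (pvCountBodyB safe_spots enemies_set) 0

-- ===== PRECONDITION & SPEC =====
def Spec_get_danger_pieces (player_pieces : List Int) (enemy_pieces : List (List Int)) (safe_spots : List Int) (out : Int) : Prop := out = get_danger_pieces_alt player_pieces enemy_pieces safe_spots
instance (player_pieces : List Int) (enemy_pieces : List (List Int)) (safe_spots : List Int) (out : Int) : Decidable (Spec_get_danger_pieces player_pieces enemy_pieces safe_spots out) := by unfold Spec_get_danger_pieces; infer_instance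

-- ===== CLAIM (what is proved, stated in full; the proofs are below) =====
def Claim_equal_get_danger_pieces : Prop := ∀ (player_pieces : List Int) (enemy_pieces : List (List Int)) (safe_spots : List Int), Dom_get_danger_pieces player_pieces enemy_pieces safe_spots → Spec_get_danger_pieces player_pieces enemy_pieces safe_spots (get_danger_pieces player_pieces enemy_pieces safe_spots)

-- ===== LEMMAS AND PROOFS =====

-- the danger condition both programs decide for a piece, phrased over A's corrected rows
abbrev pvP (ss : List Int) (flat : List Int) (p : Int) : Prop :=
  p ∉ ss ∧ ∃ e ∈ flat, pvRel p e ∧ e ∉ pvInvalidA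

lemma pv_dangerInner (ss : List Int) (piece : Int) :
    ∀ (l ds : List Int), l.foldl (pvDangerBodyA ss piece) ds =
      if piece ∉ ss ∧ piece ∉ ds ∧ ∃ e ∈ l, pvRel piece e ∧ e ∉ pvInvalidA then ds ++ [piece]
      else ds := by
  intro l
  induction l with
  | nil => intro ds; simp
  | cons e l ih =>
    intro ds
    rw [List.foldl_cons, ih]
    by_cases hq : pvRel piece e ∧ piece ∉ ss ∧ e ∉ pvInvalidA ∧ piece ∉ ds
    · have hds' : pvDangerBodyA ss piece ds e = ds ++ [piece] := by
        simp [pvDangerBodyA, hq.1, hq.2.1, hq.2.2.1, hq.2.2.2]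
      rw [hds', if_neg, if_pos]
      · exact ⟨hq.2.1, hq.2.2.2, e, List.mem_cons_self .., hq.1, hq.2.2.1⟩
      · rintro ⟨-, hnd, -⟩; exact hnd (by simp)
    · have hds' : pvDangerBodyA ss piece ds e = ds := by
        unfold pvDangerBodyA
        split_ifs with h1 h2
        · exact absurd ⟨h1, h2.1, h2.2.1, h2.2.2⟩ hq
        · rfl
        · rfl
      rw [hds']
      congr 1
      simp only [eq_iff_iff, List.mem_cons]
      constructor
      · rintro ⟨h1, h2, e', he', h3⟩; exact ⟨h1, h2, e', Or.inr he', h3⟩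
      · rintro ⟨h1, h2, e', he', h3⟩
        rcases he' with rfl | he'
        · exact absurd ⟨h3.1, h1, h3.2, h2⟩ hq
        · exact ⟨h1, h2, e', he', h3⟩
lemma pv_dangerMiddle (ss : List Int) (piece : Int) :
    ∀ (ll : List (List Int)) (ds : List Int),
      ll.foldl (fun ds enemies => enemies.foldl (pvDangerBodyA ss piece) ds) ds =
      if piece ∉ ss ∧ piece ∉ ds ∧ ∃ e ∈ ll.flatten, pvRel piece e ∧ e ∉ pvInvalidA then ds ++ [piece]
      else ds := by
  intro ll
  induction ll with
  | nil => intro ds; simp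
  | cons row ll ih =>
    intro ds
    rw [List.foldl_cons, ih, pv_dangerInner]
    by_cases hq : piece ∉ ss ∧ piece ∉ ds ∧ ∃ e ∈ row, pvRel piece e ∧ e ∉ pvInvalidA
    · rw [if_pos hq, if_neg, if_pos]
      · obtain ⟨e, he, h3⟩ := hq.2.2
        exact ⟨hq.1, hq.2.1, e, by simp [he], h3⟩
      · rintro ⟨-, hnd, -⟩; exact hnd (by simp)
    · rw [if_neg hq]
      congr 1
      simp only [eq_iff_iff, List.flatten_cons, List.mem_append]
      constructor
      · rintro ⟨h1, h2, e', he', h3⟩; exact ⟨h1, h2, e', Or.inr he', h3⟩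
      · rintro ⟨h1, h2, e', he', h3⟩
        rcases he' with he' | he'
        · exact absurd ⟨h1, h2, e', he', h3⟩ hq
        · exact ⟨h1, h2, e', he', h3⟩

lemma pv_outerA (ss : List Int) (epc : List (List Int)) :
    ∀ (pp ds : List Int), ds.Nodup →
      (pp.foldl (fun ds piece => epc.foldl
          (fun ds enemies => enemies.foldl (pvDangerBodyA ss piece) ds) ds) ds).Nodup ∧
      ∀ x, x ∈ pp.foldl (fun ds piece => epc.foldl
          (fun ds enemies => enemies.foldl (pvDangerBodyA ss piece) ds) ds) ds ↔
        x ∈ ds ∨ (x ∈ pp ∧ pvP ss epc.flatten x) := by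
  intro pp
  induction pp with
  | nil => intro ds h; simpa using h
  | cons p pp ih =>
    intro ds hnd
    rw [List.foldl_cons, pv_dangerMiddle]
    by_cases hq : p ∉ ss ∧ p ∉ ds ∧ ∃ e ∈ epc.flatten, pvRel p e ∧ e ∉ pvInvalidA
    · rw [if_pos hq]
      have hnd' : (ds ++ [p]).Nodup := by
        refine List.Nodup.append hnd (List.nodup_singleton p) ?_
        intro a ha hb
        simp only [List.mem_singleton] at hb
        subst hb; exact hq.2.1 ha
      obtain ⟨h1, h2⟩ := ih (ds ++ [p]) hnd'
      refine ⟨h1, fun x => (h2 x).trans ?_⟩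
      simp only [List.mem_append, List.mem_cons, List.not_mem_nil, or_false]
      constructor
      · rintro ((hx | rfl) | ⟨hx, hP⟩)
        · exact Or.inl hx
        · exact Or.inr ⟨Or.inl rfl, hq.1, hq.2.2⟩
        · exact Or.inr ⟨Or.inr hx, hP⟩
      · rintro (hx | ⟨(rfl | hx), hP⟩)
        · exact Or.inl (Or.inl hx)
        · exact Or.inl (Or.inr rfl)
        · exact Or.inr ⟨hx, hP⟩
    · rw [if_neg hq]
      obtain ⟨h1, h2⟩ := ih ds hnd
      refine ⟨h1, fun x => (h2 x).trans ?_⟩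
      simp only [List.mem_cons]
      constructor
      · rintro (hx | ⟨hx, hP⟩)
        · exact Or.inl hx
        · exact Or.inr ⟨Or.inr hx, hP⟩
      · rintro (hx | ⟨(rfl | hx), hP⟩)
        · exact Or.inl hx
        · rcases hP with ⟨hP1, hP2⟩
          by_cases hd : x ∈ ds
          · exact Or.inl hd
          · exact absurd ⟨hP1, hd, hP2⟩ hq
        · exact Or.inr ⟨hx, hP⟩

lemma pv_corr_not_invalid (i enemy : Int) :
    (if PySem.Int.mod (enemy + i * 13) 52 ≠ 0 then PySem.Int.mod (enemy + i * 13) 52 else 52) ∉ pvInvalidA := by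
  have h1 : (0:Int) ≤ PySem.Int.mod (enemy + i * 13) 52 := PySem.Int.mod_nonneg _ (by norm_num)
  have h2 : PySem.Int.mod (enemy + i * 13) 52 < 52 := PySem.Int.mod_lt _ (by norm_num)
  intro hmem
  simp only [pvInvalidA, List.mem_cons, List.not_mem_nil, or_false] at hmem
  split_ifs at hmem <;> omega

lemma pv_ite_corr (v : Int) : (if v ≠ 0 then v else 52) = (if v = 0 then (52:Int) else v) := by
  by_cases h : v = 0 <;> simp [h]

lemma pv_rowA_append (i : Int) :
    ∀ (l a b : List Int), l.foldl (pvRowBodyA i) (a ++ b) = a ++ l.foldl (pvRowBodyA i) b := by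
  intro l
  induction l with
  | nil => intro a b; rfl
  | cons e l ih =>
    intro a b
    rw [List.foldl_cons, List.foldl_cons]
    have hstep : pvRowBodyA i (a ++ b) e = a ++ pvRowBodyA i b e := by
      unfold pvRowBodyA; split_ifs <;> simp
    rw [hstep, ih]

lemma pv_rowRel (i : Int) :
    ∀ (l acc : List Int) (s : PySem.Set Int),
      (∀ x, x ∈ s ↔ x ∈ acc ∧ x ∉ pvInvalidA) →
      ∀ x, x ∈ l.foldl (pvRowBodyB i) s ↔ x ∈ l.foldl (pvRowBodyA i) acc ∧ x ∉ pvInvalidA := by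
  intro l
  induction l with
  | nil => intro acc s h x; exact h x
  | cons e l ih =>
    intro acc s h x
    rw [List.foldl_cons, List.foldl_cons]
    by_cases he : e ∈ pvInvalidA
    · have hB : pvRowBodyB i s e = s := by
        unfold pvRowBodyB
        rw [if_neg (not_not_intro (by simpa [pvInvalidA] using he))]
      have hA : pvRowBodyA i acc e = acc ++ [e] := by
        unfold pvRowBodyA
        rw [if_neg (not_not_intro he)]
      rw [hB, hA]
      refine ih (acc ++ [e]) s (fun y => (h y).trans ?_) x
      simp only [List.mem_append, List.mem_singleton]
      constructor
      · rintro ⟨hy, hni⟩; exact ⟨Or.inl hy, hni⟩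
      · rintro ⟨hy | rfl, hni⟩
        · exact ⟨hy, hni⟩
        · exact absurd he hni
    · have hB : pvRowBodyB i s e =
          PySem.Set.add s (if PySem.Int.mod (e + i * 13) 52 ≠ 0 then PySem.Int.mod (e + i * 13) 52 else 52) := by
        unfold pvRowBodyB
        rw [if_pos (by simpa [pvInvalidA] using he)]
      have hA : pvRowBodyA i acc e =
          acc ++ [if PySem.Int.mod (e + i * 13) 52 = 0 then (52:Int) else PySem.Int.mod (e + i * 13) 52] := by
        unfold pvRowBodyA
        rw [if_pos he]
      rw [hB, hA, pv_ite_corr]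
      refine ih _ _ (fun y => ?_) x
      rw [PySem.Set.mem_add, h y]
      have hcv := pv_corr_not_invalid i e
      rw [pv_ite_corr] at hcv
      simp only [List.mem_append, List.mem_singleton]
      constructor
      · rintro (⟨hy, hni⟩ | rfl)
        · exact ⟨Or.inl hy, hni⟩
        · exact ⟨Or.inr rfl, hcv⟩
      · rintro ⟨hy | rfl, hni⟩
        · exact Or.inl ⟨hy, hni⟩
        · exact Or.inr rfl

lemma pv_buildRel :
    ∀ (ep : List (List Int)) (i : Int) (ds : List (List Int)) (s : PySem.Set Int),
      (∀ x, x ∈ s ↔ x ∈ ds.flatten ∧ x ∉ pvInvalidA) →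
      (ep.foldl pvBuildBodyB (i, s)).1 = (ep.foldl pvCorrBodyA (i, ds)).1 ∧
      ∀ x, x ∈ (ep.foldl pvBuildBodyB (i, s)).2 ↔
        x ∈ (ep.foldl pvCorrBodyA (i, ds)).2.flatten ∧ x ∉ pvInvalidA := by
  intro ep
  induction ep with
  | nil => intro i ds s h; exact ⟨rfl, h⟩
  | cons row ep ih =>
    intro i ds s h
    simp only [List.foldl_cons]
    unfold pvBuildBodyB pvCorrBodyA
    refine ih (i + 1) (ds ++ [row.foldl (pvRowBodyA (i + 1)) []]) (row.foldl (pvRowBodyB (i + 1)) s) ?_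
    intro x
    rw [pv_rowRel (i + 1) row ds.flatten s h x]
    have : ds.flatten ++ row.foldl (pvRowBodyA (i + 1)) [] = row.foldl (pvRowBodyA (i + 1)) ds.flatten := by
      rw [← pv_rowA_append (i + 1) row ds.flatten [], List.append_nil]
    simp only [List.flatten_append, List.flatten_cons, List.flatten_nil, List.append_nil, this]

lemma pv_probeIff (es : List Int) (p : Int) :
    (((PySem.List.pyRange 1 7 1).any fun d => PySem.Set.contains es (p - d)) ||
     ((PySem.List.pyRange 46 51 1).any fun d => PySem.Set.contains es (p + d))) = true ↔
    ∃ e ∈ es, pvRel p e := by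
  have h1 : PySem.List.pyRange 1 7 1 = [1, 2, 3, 4, 5, 6] := by decide
  have h2 : PySem.List.pyRange 46 51 1 = [46, 47, 48, 49, 50] := by decide
  rw [h1, h2]
  simp only [List.any_cons, List.any_nil, Bool.or_eq_true, Bool.or_false, PySem.Set.contains_iff]
  constructor
  · rintro ((h | h | h | h | h | h) | (h | h | h | h | h)) <;> exact ⟨_, h, by unfold pvRel; omega⟩
  · rintro ⟨e, he, hrel⟩
    have : e = p - 1 ∨ e = p - 2 ∨ e = p - 3 ∨ e = p - 4 ∨ e = p - 5 ∨ e = p - 6 ∨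
        e = p + 46 ∨ e = p + 47 ∨ e = p + 48 ∨ e = p + 49 ∨ e = p + 50 := by
      unfold pvRel at hrel; omega
    rcases this with rfl | rfl | rfl | rfl | rfl | rfl | rfl | rfl | rfl | rfl | rfl <;> simp [he]

lemma pv_countB (ss : List Int) (es : PySem.Set Int) :
    ∀ (S : List Int) (n : Int), S.foldl (pvCountBodyB ss es) n =
      n + ((S.filter fun p => decide (p ∉ ss) &&
        (((PySem.List.pyRange 1 7 1).any fun d => PySem.Set.contains es (p - d)) ||
         ((PySem.List.pyRange 46 51 1).any fun d => PySem.Set.contains es (p + d)))).length : Int) := by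
  intro S
  induction S with
  | nil => intro n; simp
  | cons p S ih =>
    intro n
    rw [List.foldl_cons, List.filter_cons]
    by_cases hss : p ∈ ss
    · have hstep : pvCountBodyB ss es n p = n := by unfold pvCountBodyB; rw [if_pos hss]
      rw [hstep, ih]
      simp [hss]
    · by_cases hb : (((PySem.List.pyRange 1 7 1).any fun d => PySem.Set.contains es (p - d)) ||
          ((PySem.List.pyRange 46 51 1).any fun d => PySem.Set.contains es (p + d))) = true
      · have hstep : pvCountBodyB ss es n p = n + 1 := by
          unfold pvCountBodyB; rw [if_neg hss, if_pos hb]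
        rw [hstep, ih]
        simp only [hss, hb, decide_not, not_false_eq_true, decide_true,
          Bool.true_and, if_pos, List.length_cons]
        push_cast
        ring
      · have hstep : pvCountBodyB ss es n p = n := by
          unfold pvCountBodyB; rw [if_neg hss, if_neg hb]
        rw [hstep, ih]
        have hbf := Bool.not_eq_true _ |>.mp hb
        rw [if_neg (by rw [hbf]; simp)]

-- ===== VERDICT (by name: the statement is the Claim_ definition above) =====
theorem get_danger_pieces_spec : Claim_equal_get_danger_pieces := by
  intro pp ep ss _
  show get_danger_pieces pp ep ss = get_danger_pieces_alt pp ep ss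
  have hA : get_danger_pieces pp ep ss =
      ((pp.foldl (fun ds piece => ((ep.foldl pvCorrBodyA (0, [])).2).foldl
        (fun ds enemies => enemies.foldl (pvDangerBodyA ss piece) ds) ds) []).length : Int) := rfl
  have hB : get_danger_pieces_alt pp ep ss =
      (PySem.Set.ofList pp).foldl
        (pvCountBodyB ss ((ep.foldl pvBuildBodyB (0, PySem.Set.empty)).2)) 0 := rfl
  rw [hA, hB, pv_countB]
  have hbuild := (pv_buildRel ep 0 [] PySem.Set.empty (by intro x; simp [PySem.Set.empty])).2
  have houter := pv_outerA ss ((ep.foldl pvCorrBodyA (0, [])).2) pp [] List.nodup_nil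
  have hperm : (pp.foldl (fun ds piece => ((ep.foldl pvCorrBodyA (0, [])).2).foldl
        (fun ds enemies => enemies.foldl (pvDangerBodyA ss piece) ds) ds) []).Perm
      ((PySem.Set.ofList pp).filter fun p => decide (p ∉ ss) &&
        (((PySem.List.pyRange 1 7 1).any fun d =>
            PySem.Set.contains ((ep.foldl pvBuildBodyB (0, PySem.Set.empty)).2) (p - d)) ||
         ((PySem.List.pyRange 46 51 1).any fun d =>
            PySem.Set.contains ((ep.foldl pvBuildBodyB (0, PySem.Set.empty)).2) (p + d)))) := by
    rw [List.perm_ext_iff_of_nodup houter.1 ((PySem.Set.nodup_ofList pp).filter _)]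
    intro x
    rw [houter.2 x, List.mem_filter, PySem.Set.mem_ofList]
    simp only [List.not_mem_nil, false_or, Bool.and_eq_true, decide_eq_true_eq, pv_probeIff]
    constructor
    · rintro ⟨hx, hns, e, he, hr, hni⟩
      exact ⟨hx, hns, e, (hbuild e).mpr ⟨he, hni⟩, hr⟩
    · rintro ⟨hx, hns, e, he, hr⟩
      obtain ⟨hf, hni⟩ := (hbuild e).mp he
      exact ⟨hx, hns, e, hf, hr, hni⟩
  rw [hperm.length_eq]
  omega
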